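-- pv_equiv track=rewrite | github.com/ARUNG362/free-code-camp-daily-coding-challenge | Left-Handed Seat at the Table/main.py | find_left_handed_seats
-- ===== SOURCE A (Python) =====
-- def find_left_handed_seats(table):
--     first_row = table[0]
--     second_row = table[1]
--     res = 0
--     for i, row in enumerate(first_row):
--         if row == "U":
--             if i == len(first_row) - 1:
--                 res+=1
--             else:
--                 if i < len(first_row) -1 and first_row[i+1] != "R":
--                     res+=1
--
--     for i, row in enumerate(second_row):
--         if row == "U":
--             if i == 0:
--                 res+=1
--             else:
--                 if i > 0 and second_row[i-1] != "R":
--                     res+=1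
--
--     return res
-- ===== SOURCE B (Python) =====
-- def find_left_handed_seats(table):
--     def norm(row):
--         return "".join("U" if s == "U" else "R" if s == "R" else "x" for s in row)
--     first = norm(table[0])
--     second = norm(table[1])
--     return first.count("U") - first.count("UR") + second.count("U") - second.count("RU")
-- ===== Notes on version B (the rewrite author's own statement) =====
-- stated objective: alternative
-- what changed: B replaces A's two index-based neighbour-checking loops by normalizing each row into a character string and computing the answer arithmetically from non-overlapping substring counts: count('U')-count('UR') for the first row and count('U')-count('RU') for the second; A raises IndexError on tables with fewer than two rows, which Pre_ excludes.
import Mathlib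
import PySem

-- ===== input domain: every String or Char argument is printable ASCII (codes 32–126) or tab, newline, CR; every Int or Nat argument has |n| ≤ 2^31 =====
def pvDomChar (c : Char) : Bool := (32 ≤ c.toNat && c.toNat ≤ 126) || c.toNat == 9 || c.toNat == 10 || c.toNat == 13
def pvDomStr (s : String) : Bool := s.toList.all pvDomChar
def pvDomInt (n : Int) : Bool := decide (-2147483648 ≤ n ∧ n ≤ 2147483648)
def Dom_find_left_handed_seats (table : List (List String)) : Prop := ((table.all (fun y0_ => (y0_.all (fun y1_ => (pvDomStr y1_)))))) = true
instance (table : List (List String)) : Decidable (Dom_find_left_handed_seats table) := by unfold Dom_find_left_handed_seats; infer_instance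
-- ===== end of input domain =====

-- B normalizes each row to a char string and derives the answer from substring counts (count('U')-count('UR') / -count('RU')) instead of A's index-based neighbour loops; same cost.

-- ===== PORT A =====
-- loop body of A's first-row loop (index guards keep first_row[i+1] in range, so getD "" is never the default)
def bodyA1 (first : List String) (res : Int) (p : Int × String) : Int :=
  if p.2 = "U" then
    if p.1 = (first.length : Int) - 1 then res + 1
    else if p.1 < (first.length : Int) - 1 ∧ (PySem.List.pyGet? first (p.1 + 1)).getD "" ≠ "R" then res + 1
    else res
  else res

-- loop body of A's second-row loop
def bodyA2 (second : List String) (res : Int) (p : Int × String) : Int :=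
  if p.2 = "U" then
    if p.1 = 0 then res + 1
    else if 0 < p.1 ∧ (PySem.List.pyGet? second (p.1 - 1)).getD "" ≠ "R" then res + 1
    else res
  else res

def find_left_handed_seats (table : List (List String)) : Int :=
  let first_row := (PySem.List.pyGet? table 0).getD []
  let second_row := (PySem.List.pyGet? table 1).getD []
  let res : Int := 0
  let res := (PySem.List.enumerate first_row).foldl (bodyA1 first_row) res
  let res := (PySem.List.enumerate second_row).foldl (bodyA2 second_row) res
  res

-- ===== PORT B =====
-- Source B's norm(row): "".join of one character per seat — ported as the List Char the joined string consists of
def normChar (s : String) : Char := if s = "U" then 'U' else if s = "R" then 'R' else 'x'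

def find_left_handed_seats_alt (table : List (List String)) : Int :=
  let first := ((PySem.List.pyGet? table 0).getD []).map normChar
  let second := ((PySem.List.pyGet? table 1).getD []).map normChar
  (PySem.Chars.count first ['U'] : Int) - (PySem.Chars.count first ['U', 'R'] : Int)
    + (PySem.Chars.count second ['U'] : Int) - (PySem.Chars.count second ['R', 'U'] : Int)

-- ===== PRECONDITION & SPEC =====
-- A raises IndexError on table[1] (or table[0]) when the table has fewer than two rows; excluded.
def Pre_find_left_handed_seats (table : List (List String)) : Prop := 2 ≤ table.length
instance (table : List (List String)) : Decidable (Pre_find_left_handed_seats table) := by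
  unfold Pre_find_left_handed_seats; infer_instance

def pvWitness_find_left_handed_seats : List (List String) := [["U", "R", "U"], ["R", "U", "U"]]

def Spec_find_left_handed_seats (table : List (List String)) (out : Int) : Prop := out = find_left_handed_seats_alt table
instance (table : List (List String)) (out : Int) : Decidable (Spec_find_left_handed_seats table out) := by unfold Spec_find_left_handed_seats; infer_instance

-- ===== CLAIM (what is proved, stated in full; the proofs are below) =====
def Claim_equal_find_left_handed_seats : Prop := ∀ (table : List (List String)), Dom_find_left_handed_seats table → Pre_find_left_handed_seats table → Spec_find_left_handed_seats table (find_left_handed_seats table)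

-- ===== LEMMAS AND PROOFS =====

-- reference count for a first row: a "U" counts unless the next seat is "R"
def countFirst : List String → Int
  | [] => 0
  | [x] => if x = "U" then 1 else 0
  | x :: y :: ys => (if x = "U" ∧ y ≠ "R" then 1 else 0) + countFirst (y :: ys)

-- reference count for the tail of a second row, given the previous seat
def tailCount (prev : String) : List String → Int
  | [] => 0
  | y :: ys => (if y = "U" ∧ prev ≠ "R" then 1 else 0) + tailCount y ys

-- reference count for a second row
def countSecond : List String → Int
  | [] => 0
  | x :: xs => (if x = "U" then 1 else 0) + tailCount x xs

lemma foldA1 (front l : List String) (r : Int) :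
    (PySem.List.enumerate l (front.length : Int)).foldl (bodyA1 (front ++ l)) r
      = r + countFirst l := by
  induction l generalizing front r with
  | nil => simp [PySem.List.enumerate_nil, countFirst]
  | cons x xs ih =>
    rw [PySem.List.enumerate_cons, List.foldl_cons]
    have hstep : ∀ r' : Int,
        (PySem.List.enumerate xs ((front.length : Int) + 1)).foldl (bodyA1 (front ++ x :: xs)) r'
          = r' + countFirst xs := by
      intro r'
      have hfront : front ++ x :: xs = (front ++ [x]) ++ xs := by simp
      have hstart : (front.length : Int) + 1 = (((front ++ [x]).length : Nat) : Int) := by simp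
      rw [hfront, hstart, ih]
    cases xs with
    | nil =>
      rw [hstep]
      have hlen : ((front ++ [x]).length : Int) - 1 = (front.length : Int) := by simp
      simp only [bodyA1, hlen, countFirst]
      by_cases h1 : x = "U" <;> simp [h1]
    | cons y ys =>
      rw [hstep]
      have hlen : (front.length : Int) ≠ ((front ++ x :: y :: ys).length : Int) - 1 := by
        simp; omega
      have hget : PySem.List.pyGet? (front ++ x :: y :: ys) ((front.length : Int) + 1)
          = some y := by
        have h2 : front ++ x :: y :: ys = (front ++ [x]) ++ y :: ys := by simp
        have hcast : (front.length : Int) + 1 = (((front ++ [x]).length : Nat) : Int) := by simp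
        rw [h2, hcast, PySem.List.pyGet?_natCast]
        simp
      have hlt2 : (front.length : Int) < 1 + front.length + ys.length := by omega
      simp only [bodyA1, hget, Option.getD_some, if_neg hlen, countFirst]
      by_cases h1 : x = "U" <;> by_cases hy : y = "R" <;>
        simp [h1, hy, hlt2] <;> (try split_ifs) <;> first | ring1 | (exfalso; omega)

lemma foldA2 (front : List String) (prev : String) (l : List String) (r : Int) :
    (PySem.List.enumerate l ((front.length : Int) + 1)).foldl (bodyA2 (front ++ prev :: l)) r
      = r + tailCount prev l := by
  induction l generalizing front prev r with
  | nil => simp [PySem.List.enumerate_nil, tailCount]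
  | cons x xs ih =>
    rw [PySem.List.enumerate_cons, List.foldl_cons]
    have hstep : ∀ r' : Int,
        (PySem.List.enumerate xs ((front.length : Int) + 1 + 1)).foldl
            (bodyA2 (front ++ prev :: x :: xs)) r'
          = r' + tailCount x xs := by
      intro r'
      have hfront : front ++ prev :: x :: xs = (front ++ [prev]) ++ x :: xs := by simp
      have hstart : (front.length : Int) + 1 + 1 = (((front ++ [prev]).length : Nat) : Int) + 1 := by
        simp
      rw [hfront, hstart, ih]
    rw [hstep]
    have hne : ((front.length : Int) + 1) ≠ 0 := by omega
    have hpos : (0 : Int) < (front.length : Int) + 1 := by omega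
    have hget : PySem.List.pyGet? (front ++ prev :: x :: xs) ((front.length : Int) + 1 - 1)
        = some prev := by
      have hcast : (front.length : Int) + 1 - 1 = ((front.length : Nat) : Int) := by ring
      rw [hcast, PySem.List.pyGet?_natCast]
      simp
    simp only [bodyA2, hget, Option.getD_some, if_neg hne, tailCount]
    by_cases h1 : x = "U" <;> by_cases hp : prev = "R" <;> simp [h1, hp, hpos] <;> ring

lemma foldA1' (l : List String) (r : Int) :
    (PySem.List.enumerate l).foldl (bodyA1 l) r = r + countFirst l := by
  have h := foldA1 [] l r
  simpa using h

lemma foldA2' (l : List String) (r : Int) :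
    (PySem.List.enumerate l).foldl (bodyA2 l) r = r + countSecond l := by
  cases l with
  | nil => simp [PySem.List.enumerate_nil, countSecond]
  | cons x xs =>
    rw [PySem.List.enumerate_cons, List.foldl_cons]
    have hstep := foldA2 [] x xs (bodyA2 (x :: xs) r (0, x))
    simp only [List.length_nil, Nat.cast_zero, List.nil_append, zero_add] at hstep
    simp only [zero_add]
    rw [hstep]
    have hb : bodyA2 (x :: xs) r (0, x) = r + (if x = "U" then 1 else 0) := by
      by_cases h1 : x = "U" <;> simp [bodyA2, h1]
    rw [hb]
    simp [countSecond]
    ring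

-- number of adjacent pairs (a, b) in a char list
def adjPairs (a b : Char) : List Char → Nat
  | x :: y :: t => (if x = a ∧ y = b then 1 else 0) + adjPairs a b (y :: t)
  | _ => 0

lemma count_go_single (c : Char) (fuel : Nat) (l : List Char) (acc : Nat)
    (hf : l.length ≤ fuel) :
    PySem.Chars.count.go [c] fuel l acc = acc + l.count c := by
  induction fuel generalizing l acc with
  | zero =>
    cases l with
    | nil => simp [PySem.Chars.count.go]
    | cons x t => simp at hf
  | succ n ih =>
    cases l with
    | nil => simp [PySem.Chars.count.go]
    | cons x t =>
      simp only [List.length_cons] at hf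
      by_cases hx : x = c
      · have hpre : List.isPrefixOf [c] (x :: t) = true := by simp [List.isPrefixOf, hx]
        rw [PySem.Chars.count.go, if_pos hpre]
        simp only [List.length_cons, List.length_nil, List.drop_succ_cons, List.drop_zero]
        rw [ih t (acc + 1) (by omega)]
        simp [List.count_cons, hx]; omega
      · have hpre : List.isPrefixOf [c] (x :: t) = false := by
          simp only [List.isPrefixOf, List.isPrefixOf_nil_left, Bool.and_true, beq_eq_false_iff_ne, ne_eq]
          exact fun h => hx h.symm
        rw [PySem.Chars.count.go, if_neg (by simp [hpre])]
        rw [ih t acc (by omega)]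
        simp [List.count_cons, hx, Ne.symm hx]

lemma count_go_pair (a b : Char) (hab : a ≠ b) (fuel : Nat) (l : List Char) (acc : Nat)
    (hf : l.length ≤ fuel) :
    PySem.Chars.count.go [a, b] fuel l acc = acc + adjPairs a b l := by
  induction fuel generalizing l acc with
  | zero =>
    cases l with
    | nil => simp [PySem.Chars.count.go, adjPairs]
    | cons x t => simp at hf
  | succ n ih =>
    cases l with
    | nil => simp [PySem.Chars.count.go, adjPairs]
    | cons x t =>
      simp only [List.length_cons] at hf
      cases t with
      | nil =>
        have hpre : List.isPrefixOf [a, b] [x] = false := by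
          cases hx : x == a <;> simp [List.isPrefixOf]
        rw [PySem.Chars.count.go, if_neg (by simp [hpre])]
        rw [ih [] acc (by simp)]
        simp [adjPairs]
      | cons y t' =>
        by_cases hxy : x = a ∧ y = b
        · have hpre : List.isPrefixOf [a, b] (x :: y :: t') = true := by
            simp [List.isPrefixOf, hxy.1, hxy.2]
          rw [PySem.Chars.count.go, if_pos hpre]
          simp only [List.length_cons, List.length_nil, List.drop_succ_cons, List.drop_zero]
          rw [ih t' (acc + 1) (by simp at hf ⊢; omega)]
          have hy : adjPairs a b (y :: t') = adjPairs a b t' := by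
            cases t' with
            | nil => rfl
            | cons z t'' =>
              have hne : ¬ (y = a ∧ z = b) := fun h => hab ((hxy.2.symm.trans h.1).symm)
              simp [adjPairs, hne]
          have h2 : adjPairs a b (x :: y :: t') = 1 + adjPairs a b t' := by
            rw [show adjPairs a b (x :: y :: t')
                  = (if x = a ∧ y = b then 1 else 0) + adjPairs a b (y :: t') from rfl,
              hy, if_pos hxy]
          rw [h2]; omega
        · have hpre : List.isPrefixOf [a, b] (x :: y :: t') = false := by
            have h' : ¬ (a = x ∧ b = y) := fun h => hxy ⟨h.1.symm, h.2.symm⟩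
            simp [List.isPrefixOf]
            tauto
          rw [PySem.Chars.count.go, if_neg (by simp [hpre])]
          rw [ih (y :: t') acc (by simp at hf ⊢; omega)]
          simp [adjPairs, hxy]

lemma count_single (c : Char) (l : List Char) :
    PySem.Chars.count l [c] = l.count c := by
  rw [PySem.Chars.count, if_neg (by simp), count_go_single c l.length l 0 le_rfl]
  simp

lemma count_pair (a b : Char) (hab : a ≠ b) (l : List Char) :
    PySem.Chars.count l [a, b] = adjPairs a b l := by
  rw [PySem.Chars.count, if_neg (by simp), count_go_pair a b hab l.length l 0 le_rfl]
  simp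

-- normChar is injective on the two letters we care about
lemma normChar_eq_U (s : String) : normChar s = 'U' ↔ s = "U" := by
  unfold normChar; split_ifs with h1 h2 <;> simp_all
lemma normChar_eq_R (s : String) : normChar s = 'R' ↔ s = "R" := by
  unfold normChar; split_ifs with h1 h2 <;> simp_all

lemma beqU (x : String) : (normChar x == 'U') = decide (x = "U") := by
  by_cases h : x = "U" <;> simp [beq_iff_eq, normChar_eq_U, h]

-- first row: 'U' count minus "UR" pairs equals A's count
lemma rowFirstChars (l : List String) :
    ((l.map normChar).count 'U' : Int) - (adjPairs 'U' 'R' (l.map normChar) : Int)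
      = countFirst l := by
  induction l with
  | nil => simp [countFirst, adjPairs]
  | cons x xs ih =>
    cases xs with
    | nil =>
      have hadj : adjPairs 'U' 'R' [normChar x] = 0 := rfl
      simp only [List.map_cons, List.map_nil, List.count_cons, List.count_nil, beqU, hadj,
        countFirst]
      by_cases h1 : x = "U" <;> simp [h1]
    | cons y ys =>
      have hadj : adjPairs 'U' 'R' (List.map normChar (x :: y :: ys))
          = (if normChar x = 'U' ∧ normChar y = 'R' then 1 else 0)
            + adjPairs 'U' 'R' (List.map normChar (y :: ys)) := rfl
      rw [show countFirst (x :: y :: ys)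
            = (if x = "U" ∧ y ≠ "R" then 1 else 0) + countFirst (y :: ys) from rfl, ← ih, hadj]
      simp only [List.map_cons, List.count_cons, beqU, normChar_eq_U, normChar_eq_R]
      by_cases h1 : x = "U" <;> by_cases h2 : y = "R" <;> by_cases h3 : y = "U" <;>
        first
        | (exact absurd (h3 ▸ h2) (by intro h; exact absurd h.symm (by decide)))
        | (simp [h1, h2, h3] <;> push_cast <;> omega)

-- second row: 'U' count minus "RU" pairs equals A's count
lemma rowSecondChars (l : List String) :
    ((l.map normChar).count 'U' : Int) - (adjPairs 'R' 'U' (l.map normChar) : Int)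
      = countSecond l := by
  cases l with
  | nil => simp [countSecond, adjPairs]
  | cons x xs =>
    rw [show countSecond (x :: xs) = (if x = "U" then 1 else 0) + tailCount x xs from rfl]
    have main : ∀ (t : List String) (p : String),
        (((p :: t).map normChar).count 'U' : Int)
            - (adjPairs 'R' 'U' ((p :: t).map normChar) : Int)
          = (if p = "U" then 1 else 0) + tailCount p t := by
      intro t
      induction t with
      | nil =>
        intro p
        have hadj : adjPairs 'R' 'U' [normChar p] = 0 := rfl
        simp only [List.map_cons, List.map_nil, List.count_cons, List.count_nil, beqU, hadj,
          tailCount]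
        by_cases h1 : p = "U" <;> simp [h1]
      | cons y ys ih =>
        intro p
        have hih := ih y
        have hadj : adjPairs 'R' 'U' (List.map normChar (p :: y :: ys))
            = (if normChar p = 'R' ∧ normChar y = 'U' then 1 else 0)
              + adjPairs 'R' 'U' (List.map normChar (y :: ys)) := rfl
        rw [show tailCount p (y :: ys)
              = (if y = "U" ∧ p ≠ "R" then 1 else 0) + tailCount y ys from rfl, hadj]
        simp only [List.map_cons, List.count_cons, beqU, normChar_eq_U, normChar_eq_R] at hih ⊢
        by_cases h1 : p = "U" <;> by_cases h2 : y = "U" <;> by_cases h3 : p = "R" <;>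
          first
          | (exact absurd (h3 ▸ h1) (by intro h; exact absurd h.symm (by decide)))
          | (simp [h1, h2, h3] at hih ⊢ <;> push_cast at hih ⊢ <;> omega)
    exact main xs x

-- ===== VERDICT (by name: the statement is the Claim_ definition above) =====
theorem find_left_handed_seats_spec : Claim_equal_find_left_handed_seats := by
  intro table _ hpre
  unfold Pre_find_left_handed_seats at hpre
  match table, hpre with
  | f :: s :: rest, _ =>
    show find_left_handed_seats (f :: s :: rest) = find_left_handed_seats_alt (f :: s :: rest)
    have h0 : PySem.List.pyGet? (f :: s :: rest) 0 = some f := PySem.List.pyGet?_zero_cons _ _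
    have h1 : PySem.List.pyGet? (f :: s :: rest) 1 = some s := by
      rw [show (1 : Int) = ((1 : Nat) : Int) from by norm_num, PySem.List.pyGet?_natCast]
      simp
    unfold find_left_handed_seats find_left_handed_seats_alt
    rw [h0, h1]
    simp only [Option.getD_some]
    rw [foldA1' f 0, foldA2' s (0 + countFirst f),
      count_single 'U' (f.map normChar), count_single 'U' (s.map normChar),
      count_pair 'U' 'R' (by decide) (f.map normChar),
      count_pair 'R' 'U' (by decide) (s.map normChar),
      ← rowFirstChars f, ← rowSecondChars s]
    ring
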